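-- pv_equiv track=rewrite | github.com/catalinavictoria/PyramidWord | pyramid.py | is_pyramid_word
-- ===== SOURCE A (Python) =====
-- from collections import Counter
--
-- def is_pyramid_word(text: str) -> bool:
--     """
--     This method tests if a word is pyramid word.
--     A word is pyramid when the letters can be arrange by increasing frequency.
--     :param text: a single word, with no spaces, tabs or capitalization.
--     :return: a true/false value, indicating if the word is pyramid (true) or not (false).
--     """
--     #check input for string
--     if type(text) != str:
--         return False
--     #eliminate whitespaces, tabs and new lines
--     text = text.translate(str.maketrans('', '', ' \n\t\r'))
--     # conver to lowercase
--     text = text.lower()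
--     #check for empty string
--     if len(text) == 0:
--         return False
--     #initialize a counter
--     word_count = Counter()
--     #traverse the string to get letters
--     for letter in text:
--         word_count[letter] += 1
--     # sorting count of letters
--     sorted_count = sorted(word_count.values())
--     # compare index and num, if they don't differ by one, the word is not a pyramid
--     for i, num in enumerate(sorted_count):
--         if num - i != 1:
--             return False
--     return True
-- ===== SOURCE B (Python) =====
-- from collections import Counter
--
-- def is_pyramid_word(text: str) -> bool:
--     if type(text) != str:
--         return False
--     text = text.translate(str.maketrans('', '', ' \n\t\r')).lower()
--     if not text:
--         return False
--     counts = list(Counter(text).values())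
--     # k distinct positive integers whose max is k are exactly {1,..,k}
--     return len(set(counts)) == len(counts) and max(counts) == len(counts)
-- ===== Notes on version B (the rewrite author's own statement) =====
-- stated objective: simpler
-- what changed: Replaces A's sort of the frequency counts plus positional enumerate scan with an algebraic check: the counts form 1..k iff they are pairwise distinct and their maximum equals their number.
import Mathlib
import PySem

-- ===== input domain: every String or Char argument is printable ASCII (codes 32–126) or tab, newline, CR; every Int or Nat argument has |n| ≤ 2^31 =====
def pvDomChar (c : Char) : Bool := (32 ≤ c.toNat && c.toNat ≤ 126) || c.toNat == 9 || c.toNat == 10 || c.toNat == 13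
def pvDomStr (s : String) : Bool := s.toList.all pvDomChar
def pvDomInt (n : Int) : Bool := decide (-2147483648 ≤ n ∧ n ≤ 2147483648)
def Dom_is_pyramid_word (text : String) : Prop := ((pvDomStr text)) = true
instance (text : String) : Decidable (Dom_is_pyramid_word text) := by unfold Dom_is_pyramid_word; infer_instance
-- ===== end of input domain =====

-- B replaces A's sort-and-enumerate check of the frequency counts by the algebraic
-- test "counts distinct and max(counts) == len(counts)" (objective: simpler).

-- ===== PORT A =====
-- text.translate(str.maketrans('', '', ' \n\t\r')): a delete-only translation table;
-- ported by hand as a filter removing exactly those four characters (exact).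
def pvDelWs (cs : List Char) : List Char :=
  cs.filter (fun c => !([' ', '\n', '\t', '\r'].contains c))

-- the 'for i, num in enumerate(sorted_count)' loop with its early return
def pvCheckA : Nat → List Int → Bool
  | _, [] => true
  | i, num :: t => if num - (i : Int) ≠ 1 then false else pvCheckA (i + 1) t

def is_pyramid_word (text : String) : Bool :=
  -- type(text) != str is always false here: text : String
  let t := pvDelWs text.toList
  let t := PySem.Chars.lower t
  if t.length = 0 then false
  else
    let word_count := t.foldl (fun d x => d.modify x 0 (· + 1)) (PySem.Dict.empty : PySem.Dict Char Int)
    let sorted_count := PySem.List.sorted word_count.values (fun x => x)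
    pvCheckA 0 sorted_count

-- ===== PORT B =====
def is_pyramid_word_alt (text : String) : Bool :=
  let t := PySem.Chars.lower (pvDelWs text.toList)
  if t.isEmpty then false
  else
    let counts := (PySem.Dict.counter t).values
    ((PySem.Set.ofList counts).length == counts.length) &&
      (PySem.List.max? counts (fun x => x) == some (counts.length : Int))

-- ===== PRECONDITION & SPEC =====
def Spec_is_pyramid_word (text : String) (out : Bool) : Prop := out = is_pyramid_word_alt text
instance (text : String) (out : Bool) : Decidable (Spec_is_pyramid_word text out) := by unfold Spec_is_pyramid_word; infer_instance

-- ===== CLAIM (what is proved, stated in full; the proofs are below) =====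
def Claim_equal_is_pyramid_word : Prop := ∀ (text : String), Dom_is_pyramid_word text → Spec_is_pyramid_word text (is_pyramid_word text)

-- ===== LEMMAS AND PROOFS =====

-- A's enumerate loop accepts exactly the list i+1, i+2, …
theorem pvCheckA_iff (s : List Int) (i : Nat) :
    pvCheckA i s = true ↔ s = (List.range' (i + 1) s.length).map (fun (k : Nat) => (k : Int)) := by
  induction s generalizing i with
  | nil => simp [pvCheckA]
  | cons n t ih =>
    simp only [pvCheckA, List.length_cons, List.range'_succ, List.map_cons, List.cons.injEq]
    by_cases hc : n - (i : Int) = 1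
    · rw [if_neg (by omega), ih (i + 1)]
      constructor
      · intro h; exact ⟨by push_cast; omega, h⟩
      · rintro ⟨-, h⟩; exact h
    · rw [if_pos (by omega)]
      simp only [Bool.false_eq_true, false_iff, not_and]
      intro h1
      exfalso; push_cast at h1; omega

theorem pvSetLen_iff (l : List Int) :
    (PySem.Set.ofList l).length = l.length ↔ l.Nodup := by
  have hmem : ∀ a : Int, a ∈ (PySem.Set.ofList l).toFinset ↔ a ∈ l.toFinset := by
    intro a; simp [List.mem_toFinset, PySem.Set.mem_ofList]
  have htf : (PySem.Set.ofList l).toFinset = l.toFinset := Finset.ext hmem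
  have hlen : (PySem.Set.ofList l).length = l.toFinset.card := by
    rw [← htf, List.toFinset_card_of_nodup (PySem.Set.nodup_ofList l)]
  rw [hlen, List.card_toFinset]
  constructor
  · intro h
    have hs := (List.dedup_sublist l).eq_of_length h
    rw [← hs]; exact l.nodup_dedup
  · intro h; rw [List.Nodup.dedup h]

-- the heart: for a nonempty list of positive integers, "sorted l passes A's scan"
-- equals "l is duplicate-free and max l = len l"
theorem pvKey (l : List Int) (hne : l ≠ []) (hpos : ∀ x ∈ l, 1 ≤ x) :
    pvCheckA 0 (PySem.List.sorted l (fun x => x)) =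
      (((PySem.Set.ofList l).length == l.length) &&
        (PySem.List.max? l (fun x => x) == some (l.length : Int))) := by
  rw [Bool.eq_iff_iff]
  simp only [Bool.and_eq_true, beq_iff_eq]
  rw [pvCheckA_iff, PySem.List.length_sorted, pvSetLen_iff]
  set n := l.length with hn
  set R : List Int := (List.range' (0 + 1) n).map (fun (k : Nat) => (k : Int)) with hR
  have hmemR : ∀ x : Int, x ∈ R ↔ 1 ≤ x ∧ x ≤ (n : Int) := by
    intro x
    rw [hR, List.mem_map]
    constructor
    · rintro ⟨k, hk, rfl⟩
      rw [List.mem_range'_1] at hk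
      omega
    · rintro ⟨h1, h2⟩
      exact ⟨x.toNat, List.mem_range'_1.mpr (by omega), by omega⟩
  have hRpw : R.Pairwise (fun a b : Int => a < b) := by
    rw [hR, List.pairwise_map]
    exact (List.pairwise_lt_range' 1).imp (fun h => by exact_mod_cast h)
  have hRnodup : R.Nodup := hRpw.imp (fun h => ne_of_lt h)
  have hnpos : 0 < n := List.length_pos_iff.mpr hne
  constructor
  · intro h
    have hperm : R.Perm l := h ▸ PySem.List.sorted_perm l (fun x => x) false
    have hnodup : l.Nodup := hperm.nodup_iff.mp hRnodup
    refine ⟨hnodup, ?_⟩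
    cases hmax : PySem.List.max? l (fun x => x) with
    | none => exact absurd ((PySem.List.max?_eq_none_iff l _).mp hmax) hne
    | some m =>
      have hm1 : m ∈ l := PySem.List.max?_mem hmax
      have hm2 : ∀ y ∈ l, y ≤ m := fun y hy => PySem.List.max?_isMax hmax y hy
      have hmR : m ∈ R := hperm.mem_iff.mpr hm1
      have hnR : (n : Int) ∈ R := (hmemR _).mpr ⟨by exact_mod_cast hnpos, le_refl _⟩
      have h1 : m ≤ (n : Int) := ((hmemR m).mp hmR).2
      have h2 : (n : Int) ≤ m := hm2 _ (hperm.mem_iff.mp hnR)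
      congr 1; omega
  · rintro ⟨hnodup, hmax⟩
    have hm2 : ∀ y ∈ l, y ≤ (n : Int) := fun y hy => PySem.List.max?_isMax hmax y hy
    have hsub : l.toFinset ⊆ Finset.Icc (1 : Int) (n : Int) := by
      intro x hx
      rw [List.mem_toFinset] at hx
      exact Finset.mem_Icc.mpr ⟨hpos x hx, hm2 x hx⟩
    have hcardIcc : (Finset.Icc (1 : Int) (n : Int)).card = n := by
      rw [Int.card_Icc]; omega
    have hcardl : l.toFinset.card = n := List.toFinset_card_of_nodup hnodup
    have heq : l.toFinset = Finset.Icc (1 : Int) (n : Int) :=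
      Finset.eq_of_subset_of_card_le hsub (by omega)
    have hperm : R.Perm l := by
      rw [List.perm_ext_iff_of_nodup hRnodup hnodup]
      intro a
      rw [hmemR a, ← List.mem_toFinset, heq, Finset.mem_Icc]
    exact PySem.List.sorted_eq_of_perm_of_pairwise_lt l R (fun x => x) hperm hRpw

-- counter values are counts of members: all positive, nonempty when the text is
theorem pvCounts_pos (cs : List Char) (x : Int) (hx : x ∈ (PySem.Dict.counter cs).values) : 1 ≤ x := by
  have : (PySem.Dict.counter cs).values = (PySem.Set.ofList cs).map (fun k => (cs.count k : Int)) := by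
    show (PySem.Dict.counter cs).items.map Prod.snd = _
    rw [PySem.Dict.items_counter]; simp
  rw [this] at hx
  obtain ⟨k, hk, rfl⟩ := List.mem_map.mp hx
  have : k ∈ cs := (PySem.Set.mem_ofList cs k).mp hk
  have := List.count_pos_iff.mpr this
  exact_mod_cast this

theorem pvCounts_ne_nil (cs : List Char) (h : cs ≠ []) : (PySem.Dict.counter cs).values ≠ [] := by
  have hv : (PySem.Dict.counter cs).values = (PySem.Set.ofList cs).map (fun k => (cs.count k : Int)) := by
    show (PySem.Dict.counter cs).items.map Prod.snd = _
    rw [PySem.Dict.items_counter]; simp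
  rw [hv]
  cases cs with
  | nil => exact absurd rfl h
  | cons a t =>
    have : a ∈ PySem.Set.ofList (a :: t) := (PySem.Set.mem_ofList _ _).mpr (List.mem_cons_self)
    intro hcon
    rw [List.map_eq_nil_iff] at hcon
    rw [hcon] at this
    exact absurd this (List.not_mem_nil)

-- ===== VERDICT (by name: the statement is the Claim_ definition above) =====
theorem is_pyramid_word_spec : Claim_equal_is_pyramid_word := by
  intro text _
  unfold Spec_is_pyramid_word is_pyramid_word is_pyramid_word_alt
  simp only [← PySem.Dict.counter_eq_foldl]
  set t := PySem.Chars.lower (pvDelWs text.toList) with ht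
  by_cases hnil : t = []
  · simp [hnil]
  · rw [if_neg (by simpa [List.length_eq_zero_iff] using hnil), if_neg (by simpa [List.isEmpty_iff] using hnil)]
    exact pvKey _ (pvCounts_ne_nil t hnil) (pvCounts_pos t)
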